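-- pv_equiv track=rewrite | github.com/JonasMarx3007/GOVis | backend/server.py | _go_items
-- ===== SOURCE A (Python) =====
-- def _go_items(values: list[str]) -> list[str]:
--     items: list[str] = []
--     for raw in values:
--         for line in raw.replace(";", "\n").splitlines():
--             line = line.strip()
--             if not line:
--                 continue
--             if "," in line:
--                 items.extend(part.strip() for part in line.split(",") if part.strip())
--             else:
--                 items.append(line)
--     return list(dict.fromkeys(items))
-- ===== SOURCE B (Python) =====
-- def _go_items(values: list[str]) -> list[str]:
--     # single-pass character scanner: ';', ',', '\n', '\r' all act as token delimiters
--     items: list[str] = []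
--     for raw in values:
--         cur: list[str] = []
--         for ch in raw:
--             if ch in ";,\n\r":
--                 tok = "".join(cur).strip()
--                 if tok:
--                     items.append(tok)
--                 cur = []
--             else:
--                 cur.append(ch)
--         tok = "".join(cur).strip()
--         if tok:
--             items.append(tok)
--     return list(dict.fromkeys(items))
-- ===== Notes on version B (the rewrite author's own statement) =====
-- stated objective: alternative
-- what changed: Replaces A's replace-then-splitlines pipeline with a conditional nested comma re-split per line by a single-pass character scanner that treats ';', ',', '\n', '\r' uniformly as token delimiters, emitting stripped tokens as it goes; dedup stays list(dict.fromkeys(...)).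
import Mathlib
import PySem

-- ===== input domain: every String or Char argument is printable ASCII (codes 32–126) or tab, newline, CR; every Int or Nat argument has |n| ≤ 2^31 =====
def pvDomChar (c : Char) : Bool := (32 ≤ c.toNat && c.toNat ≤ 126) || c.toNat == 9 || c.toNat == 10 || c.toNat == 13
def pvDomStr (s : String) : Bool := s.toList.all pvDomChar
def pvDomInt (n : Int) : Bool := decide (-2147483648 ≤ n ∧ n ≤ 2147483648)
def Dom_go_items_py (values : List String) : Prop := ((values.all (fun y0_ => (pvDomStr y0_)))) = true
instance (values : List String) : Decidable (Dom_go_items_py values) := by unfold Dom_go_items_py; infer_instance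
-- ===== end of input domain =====

-- B replaces A's replace-";"/splitlines pipeline with its conditional per-line comma re-split by a
-- single-pass character scanner treating ';', ',', '\n', '\r' uniformly as delimiters (objective: alternative).

-- ===== PORT A =====
def go_items_py (values : List String) : List String :=
  let items :=
    values.foldl (fun items raw =>
      (PySem.Str.splitlines (PySem.Str.replace raw ";" "\n")).foldl (fun items line =>
        let line := PySem.Str.strip line
        if line = "" then items
        else if PySem.Str.isIn "," line then
          items ++ ((((PySem.Str.split? line ",").getD []).map PySem.Str.strip).filter
            (fun p => decide (p ≠ "")))
        else items ++ [line]) items) []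
  PySem.List.dedup items

-- ===== PORT B =====
def go_items_py_alt (values : List String) : List String :=
  let items :=
    values.foldl (fun items raw =>
      let st := raw.toList.foldl (fun (st : List String × List Char) ch =>
        if ch = ';' ∨ ch = ',' ∨ ch = '\n' ∨ ch = '\r' then
          let tok := PySem.Str.strip (String.ofList st.2)
          ((if tok = "" then st.1 else st.1 ++ [tok]), [])
        else (st.1, st.2 ++ [ch])) (items, ([] : List Char))
      let tok := PySem.Str.strip (String.ofList st.2)
      if tok = "" then st.1 else st.1 ++ [tok]) []
  PySem.List.dedup items

-- ===== PRECONDITION & SPEC =====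
def Spec_go_items_py (values : List String) (out : List String) : Prop := out = go_items_py_alt values
instance (values : List String) (out : List String) : Decidable (Spec_go_items_py values out) := by unfold Spec_go_items_py; infer_instance

-- ===== CLAIM (what is proved, stated in full; the proofs are below) =====
def Claim_equal_go_items_py : Prop := ∀ (values : List String), Dom_go_items_py values → Spec_go_items_py values (go_items_py values)

-- ===== LEMMAS AND PROOFS =====

def pvSub (c : Char) : Char := if c = ';' then '\n' else c

theorem pv_rgo (fuel : Nat) : ∀ (l acc : List Char), l.length ≤ fuel →
    PySem.Chars.replace.go [';'] ['\n'] fuel l acc = acc.reverse ++ l.map pvSub := by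
  induction fuel with
  | zero => intro l acc h; cases l <;> simp_all [PySem.Chars.replace.go]
  | succ n ih =>
    intro l acc h
    cases l with
    | nil => simp [PySem.Chars.replace.go]
    | cons c t =>
      simp only [PySem.Chars.replace.go]
      by_cases hc : c = ';'
      · subst hc
        rw [if_pos (by simp [List.isPrefixOf])]
        rw [ih _ _ (by simpa using Nat.le_of_succ_le_succ h)]
        simp [pvSub]
      · rw [if_neg (by simp [List.isPrefixOf]; intro hh; exact hc hh.symm)]
        rw [ih _ _ (by simpa using Nat.le_of_succ_le_succ h)]
        simp [pvSub, hc]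

theorem pv_replace_semi (s : List Char) :
    PySem.Chars.replace s [';'] ['\n'] = s.map pvSub := by
  simp [PySem.Chars.replace, pv_rgo s.length s [] le_rfl]

def pvConsHead (c : Char) : List (List Char) → List (List Char)
  | [] => [[c]]
  | h :: t => (c :: h) :: t

def pvConsPre (p : List Char) (L : List (List Char)) : List (List Char) :=
  (p ++ L.headI) :: L.tail

def pvSplitD (p : Char → Bool) : List Char → List (List Char)
  | [] => [[]]
  | c :: r => if p c then [] :: pvSplitD p r else pvConsHead c (pvSplitD p r)

def pvSplitC : List Char → List (List Char) := pvSplitD (· == ',')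

theorem pvSplitD_ne_nil (p : Char → Bool) (l : List Char) : pvSplitD p l ≠ [] := by
  cases l <;> simp [pvSplitD] <;> split <;> simp [pvConsHead] <;> split <;> simp

theorem pvConsHead_eq (c : Char) (L : List (List Char)) :
    pvConsHead c L = (c :: L.headI) :: L.tail := by
  cases L <;> simp [pvConsHead]
  rfl

theorem pv_sgo (fuel : Nat) : ∀ (l cur : List Char) (acc : List (List Char)), l.length < fuel →
    PySem.Chars.splitOn.go [','] fuel l cur acc =
      acc.reverse ++ pvConsPre cur.reverse (pvSplitC l) := by
  induction fuel with
  | zero => intro l cur acc h; exact absurd h (by omega)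
  | succ n ih =>
    intro l cur acc h
    cases l with
    | nil => simp [PySem.Chars.splitOn.go, pvConsPre, pvSplitC, pvSplitD]
    | cons c t =>
      simp only [PySem.Chars.splitOn.go]
      by_cases hc : c = ','
      · subst hc
        rw [if_pos (by simp [List.isPrefixOf])]
        rw [ih _ _ _ (by simp at h ⊢; omega)]
        have hne := pvSplitD_ne_nil (· == ',') t
        simp [pvConsPre, pvSplitC, pvSplitD, pvConsHead_eq]
        cases hSD : pvSplitD (· == ',') t with
        | nil => exact absurd hSD hne
        | cons a b => simp
      · rw [if_neg (by simp [List.isPrefixOf]; intro hh; exact hc hh.symm)]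
        rw [ih _ _ _ (by simp at h ⊢; omega)]
        simp [pvConsPre, pvSplitC, pvSplitD, hc, pvConsHead_eq]

theorem pv_splitOn_comma (l : List Char) :
    PySem.Chars.splitOn l [','] = pvSplitC l := by
  rw [PySem.Chars.splitOn, pv_sgo (l.length + 1) l [] [] (by omega)]
  have hne := pvSplitD_ne_nil (· == ',') l
  cases hSD : pvSplitC l with
  | nil => exact absurd hSD hne
  | cons a b => simp [pvConsPre, hSD]

def pvSL : List Char → List (List Char)
  | [] => []
  | [c] => if c = '\n' ∨ c = '\r' then [[]] else [[c]]
  | c :: d :: r =>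
    if c = '\r' ∧ d = '\n' then [] :: pvSL r
    else if c = '\n' ∨ c = '\r' then [] :: pvSL (d :: r)
    else pvConsHead c (pvSL (d :: r))

theorem pv_char_eq_iff (c d : Char) : c = d ↔ c.toNat = d.toNat :=
  ⟨fun h => by rw [h], fun h => Char.ext (UInt32.toNat_inj.mp h)⟩

theorem pvSL_nl (r : List Char) : pvSL ('\n' :: r) = [] :: pvSL r := by
  cases r <;> simp [pvSL]

theorem pvSL_crlf (r : List Char) : pvSL ('\r' :: '\n' :: r) = [] :: pvSL r := by
  simp [pvSL]

theorem pvSL_cr (r : List Char) (h : ∀ r', r ≠ '\n' :: r') : pvSL ('\r' :: r) = [] :: pvSL r := by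
  cases r with
  | nil => simp [pvSL]
  | cons d r' =>
    have hd : d ≠ '\n' := fun hh => h r' (by rw [hh])
    simp [pvSL, hd]

theorem pvSL_cons_nondelim (c : Char) (r : List Char) (h1 : c ≠ '\n') (h2 : c ≠ '\r') :
    pvSL (c :: r) = pvConsHead c (pvSL r) := by
  cases r <;> simp [pvSL, h1, h2, pvConsHead]

theorem pvConsHead_ne_nil (c : Char) (L : List (List Char)) : pvConsHead c L ≠ [] := by
  cases L <;> simp [pvConsHead]

theorem pvSL_ne_nil (v : List Char) (h : v ≠ []) : pvSL v ≠ [] := by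
  cases v with
  | nil => exact absurd rfl h
  | cons c r =>
    cases r with
    | nil => by_cases hc : c = '\n' ∨ c = '\r' <;> simp [pvSL, hc]
    | cons d r' =>
      rw [pvSL]
      split_ifs <;> simp [pvConsHead_ne_nil]

theorem pvSL_nodelim (l : List Char) (h : ∀ c ∈ l, c ≠ '\n' ∧ c ≠ '\r') :
    pvSL l = if l = [] then [] else [l] := by
  induction l with
  | nil => simp [pvSL]
  | cons c r ih =>
    have hc := h c (by simp)
    rw [pvSL_cons_nondelim c r hc.1 hc.2, ih (fun x hx => h x (by simp [hx]))]
    by_cases hr : r = [] <;> simp [hr, pvConsHead]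

theorem pvSL_append (p v : List Char) (hp : ∀ c ∈ p, c ≠ '\n' ∧ c ≠ '\r') (hv : v ≠ []) :
    pvSL (p ++ v) = (p ++ (pvSL v).headI) :: (pvSL v).tail := by
  induction p with
  | nil =>
    simp only [List.nil_append]
    cases hSL : pvSL v with
    | nil => exact absurd hSL (pvSL_ne_nil v hv)
    | cons a b => simp
  | cons c p' ih =>
    have hc := hp c (by simp)
    have hne : p' ++ v ≠ [] := by simp [hv]
    rw [List.cons_append, pvSL_cons_nondelim c _ hc.1 hc.2, ih (fun x hx => hp x (by simp [hx]))]
    simp [pvConsHead]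

theorem pv_slgo (isB : Char → Bool)
    (hB : ∀ c, pvDomChar c = true → isB c = (decide (c = '\n') || decide (c = '\r'))) :
    ∀ (n : Nat) (v : List Char), v.length ≤ n → ∀ (cur : List Char) (acc : List (List Char)),
      (∀ c ∈ v, pvDomChar c = true) → (∀ c ∈ cur, c ≠ '\n' ∧ c ≠ '\r') →
      PySem.Chars.splitlines.go isB v cur acc = acc.reverse ++ pvSL (cur.reverse ++ v) := by
  intro n
  induction n with
  | zero =>
    intro v hlen cur acc _ hcur
    have : v = [] := List.length_eq_zero_iff.mp (Nat.le_zero.mp hlen)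
    subst this
    rw [PySem.Chars.splitlines.go.eq_def]
    simp only [List.append_nil]
    rw [pvSL_nodelim cur.reverse (by simpa using hcur)]
    by_cases hc : cur = [] <;> simp [hc]
  | succ m ih =>
    intro v hlen cur acc hv hcur
    cases v with
    | nil =>
      rw [PySem.Chars.splitlines.go.eq_def]
      simp only [List.append_nil]
      rw [pvSL_nodelim cur.reverse (by simpa using hcur)]
      by_cases hc : cur = [] <;> simp [hc]
    | cons c rest =>
      by_cases hcrlf : c = '\r' ∧ ∃ r', rest = '\n' :: r'
      · obtain ⟨hc, r', hr⟩ := hcrlf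
        subst hc hr
        rw [show PySem.Chars.splitlines.go isB ('\r' :: '\n' :: r') cur acc
              = PySem.Chars.splitlines.go isB r' [] (cur.reverse :: acc) from rfl]
        rw [ih r' (by simp at hlen ⊢; omega) [] (cur.reverse :: acc)
              (fun x hx => hv x (by simp [hx])) (by simp)]
        rw [pvSL_append cur.reverse _ (by simpa using hcur) (by simp), pvSL_crlf]
        simp
      · -- not the '\r\n' two-char pattern
        have hgo : PySem.Chars.splitlines.go isB (c :: rest) cur acc
            = if isB c = true then PySem.Chars.splitlines.go isB rest [] (cur.reverse :: acc)
              else PySem.Chars.splitlines.go isB rest (c :: cur) acc := by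
          rw [PySem.Chars.splitlines.go.eq_def]
          cases rest with
          | nil => by_cases h : c = '\r' <;> simp [h]
          | cons d r' =>
            by_cases h : c = '\r'
            · have hd : d ≠ '\n' := fun hh => hcrlf ⟨h, r', by rw [hh]⟩
              subst h; simp [hd]
            · simp [h]
        rw [hgo]
        have hdomc := hv c (by simp)
        rw [hB c hdomc]
        by_cases hbrk : c = '\n' ∨ c = '\r'
        · rw [if_pos (by rcases hbrk with h | h <;> simp [h])]
          rw [ih rest (by simp at hlen ⊢; omega) [] (cur.reverse :: acc)
                (fun x hx => hv x (by simp [hx])) (by simp)]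
          rw [pvSL_append cur.reverse (c :: rest) (by simpa using hcur) (by simp)]
          have hSLc : pvSL (c :: rest) = [] :: pvSL rest := by
            rcases hbrk with h | h
            · rw [h, pvSL_nl]
            · subst h
              exact pvSL_cr rest (fun r' hh => hcrlf ⟨rfl, r', hh⟩)
          rw [hSLc]
          simp
        · push_neg at hbrk
          rw [if_neg (by simp [hbrk.1, hbrk.2])]
          rw [ih rest (by simp at hlen ⊢; omega) (c :: cur) acc
                (fun x hx => hv x (by simp [hx]))
                (by intro x hx; rcases List.mem_cons.mp hx with h | h
                    · subst h; exact hbrk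
                    · exact hcur x h)]
          simp

theorem pv_splitlines_eq_pvSL (v : List Char) (h : ∀ c ∈ v, pvDomChar c = true) :
    PySem.Chars.splitlines v = pvSL v := by
  show PySem.Chars.splitlines.go _ v [] [] = _
  rw [pv_slgo _ ?_ v.length v le_rfl [] [] h (by simp)]
  · simp
  · intro c hc
    have h10 : (c = '\n') ↔ c.toNat = 10 := pv_char_eq_iff c '\n'
    have h13 : (c = '\r') ↔ c.toNat = 13 := pv_char_eq_iff c '\r'
    simp only [pvDomChar, Bool.or_eq_true, Bool.and_eq_true, beq_iff_eq,
      decide_eq_true_eq] at hc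
    apply Bool.eq_iff_iff.mpr
    simp only [Bool.or_eq_true, decide_eq_true_eq, h10, h13]
    omega

theorem pv_strip_cons_space (w : Char) (l : List Char) (h : PySem.Chars.isspace w = true) :
    PySem.Chars.strip (w :: l) = PySem.Chars.strip l := by
  simp [PySem.Chars.strip, PySem.Chars.lstrip, List.dropWhile_cons, h]

theorem pv_rstrip_snoc_space (w : Char) (l : List Char) (h : PySem.Chars.isspace w = true) :
    PySem.Chars.rstrip (l ++ [w]) = PySem.Chars.rstrip l := by
  simp [PySem.Chars.rstrip, List.dropWhile_cons, h]

theorem pv_rstrip_snoc_nonspace (w : Char) (l : List Char) (h : ¬ PySem.Chars.isspace w = true) :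
    PySem.Chars.rstrip (l ++ [w]) = l ++ [w] := by
  simp [PySem.Chars.rstrip, List.dropWhile_cons, h]

theorem pv_strip_snoc_space (w : Char) (l : List Char) (h : PySem.Chars.isspace w = true) :
    PySem.Chars.strip (l ++ [w]) = PySem.Chars.strip l := by
  induction l with
  | nil => simp [PySem.Chars.strip, PySem.Chars.lstrip, PySem.Chars.rstrip, List.dropWhile_cons, h]
  | cons c t ih =>
    by_cases hc : PySem.Chars.isspace c = true
    · rw [List.cons_append, pv_strip_cons_space c _ hc, pv_strip_cons_space c _ hc, ih]
    · have hl : PySem.Chars.lstrip (c :: t ++ [w]) = c :: t ++ [w] := by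
        simp [PySem.Chars.lstrip, List.dropWhile_cons, hc]
      have hl2 : PySem.Chars.lstrip (c :: t) = c :: t := by
        simp [PySem.Chars.lstrip, List.dropWhile_cons, hc]
      rw [PySem.Chars.strip, PySem.Chars.strip, hl, hl2]
      rw [show c :: t ++ [w] = (c :: t) ++ [w] from rfl, pv_rstrip_snoc_space w _ h]

theorem pv_mem_strip (c : Char) (l : List Char) (hc : ¬ PySem.Chars.isspace c = true)
    (hm : c ∈ l) : c ∈ PySem.Chars.strip l := by
  rw [PySem.Chars.strip]
  have h1 : c ∈ PySem.Chars.lstrip l := by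
    rw [PySem.Chars.lstrip]
    rcases (List.mem_append.mp (by rw [List.takeWhile_append_dropWhile]; exact hm :
        c ∈ l.takeWhile PySem.Chars.isspace ++ l.dropWhile PySem.Chars.isspace)) with h | h
    · exact absurd (List.mem_takeWhile_imp h) hc
    · exact h
  rw [PySem.Chars.rstrip]
  have h2 : c ∈ (PySem.Chars.lstrip l).reverse := by simpa using h1
  rcases (List.mem_append.mp (by rw [List.takeWhile_append_dropWhile]; exact h2 :
      c ∈ (PySem.Chars.lstrip l).reverse.takeWhile PySem.Chars.isspace
        ++ (PySem.Chars.lstrip l).reverse.dropWhile PySem.Chars.isspace)) with h | h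
  · exact absurd (List.mem_takeWhile_imp h) hc
  · simpa using h

theorem pv_strip_subset (c : Char) (l : List Char) (h : c ∈ PySem.Chars.strip l) : c ∈ l := by
  rw [PySem.Chars.strip, PySem.Chars.rstrip, PySem.Chars.lstrip] at h
  have h1 := List.dropWhile_sublist (l := (List.dropWhile PySem.Chars.isspace l).reverse)
    (p := PySem.Chars.isspace)
  have h2 := List.dropWhile_sublist (l := l) (p := PySem.Chars.isspace)
  have := h1.mem (by simpa using h)
  exact h2.mem (by simpa using this)

theorem pv_comma_mem_strip_iff (l : List Char) : ',' ∈ PySem.Chars.strip l ↔ ',' ∈ l :=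
  ⟨pv_strip_subset ',' l, pv_mem_strip ',' l (by decide)⟩

theorem pv_strip_nil_no_comma (l : List Char) (h : PySem.Chars.strip l = []) : ',' ∉ l := by
  intro hm
  have := pv_mem_strip ',' l (by decide) hm
  rw [h] at this
  simp at this

theorem pv_isIn_singleton (c : Char) (l : List Char) :
    PySem.Chars.isIn [c] l = true ↔ c ∈ l := by
  rw [PySem.Chars.isIn_iff_infix]
  constructor
  · intro h
    exact h.mem (by simp)
  · intro h
    obtain ⟨s, t, rfl⟩ := List.append_of_mem h
    exact ⟨s, t, by simp⟩

def pvModLast (f : List Char → List Char) : List (List Char) → List (List Char)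
  | [] => []
  | [x] => [f x]
  | x :: y :: t => x :: pvModLast f (y :: t)

theorem pvSplitC_cons_comma (l : List Char) : pvSplitC (',' :: l) = [] :: pvSplitC l := by
  simp [pvSplitC, pvSplitD]

theorem pvSplitC_cons_ne (c : Char) (l : List Char) (h : c ≠ ',') :
    pvSplitC (c :: l) = pvConsHead c (pvSplitC l) := by
  simp [pvSplitC, pvSplitD, h]

theorem pvSplitC_no_comma (l : List Char) (h : ',' ∉ l) : pvSplitC l = [l] := by
  induction l with
  | nil => simp [pvSplitC, pvSplitD]
  | cons c t ih =>
    have hc : c ≠ ',' := fun hh => h (by simp [hh])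
    rw [pvSplitC_cons_ne c t hc, ih (fun hh => h (by simp [hh]))]
    simp [pvConsHead]

theorem pvSplitC_snoc (w : Char) (l : List Char) (h : w ≠ ',') :
    pvSplitC (l ++ [w]) = pvModLast (· ++ [w]) (pvSplitC l) := by
  induction l with
  | nil => simp [pvSplitC, pvSplitD, h, pvConsHead, pvModLast]
  | cons c t ih =>
    by_cases hc : c = ','
    · subst hc
      rw [List.cons_append, pvSplitC_cons_comma, pvSplitC_cons_comma, ih]
      cases hS : pvSplitC t with
      | nil => exact absurd hS (pvSplitD_ne_nil _ t)
      | cons a b => simp [pvModLast]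
    · rw [List.cons_append, pvSplitC_cons_ne c _ hc, pvSplitC_cons_ne c _ hc, ih]
      cases hS : pvSplitC t with
      | nil => exact absurd hS (pvSplitD_ne_nil _ t)
      | cons a b =>
        cases b with
        | nil => simp [pvModLast, pvConsHead]
        | cons x y => simp [pvModLast, pvConsHead]

theorem pv_mapstrip_modLast_space (w : Char) (L : List (List Char))
    (h : PySem.Chars.isspace w = true) :
    (pvModLast (· ++ [w]) L).map PySem.Chars.strip = L.map PySem.Chars.strip := by
  induction L with
  | nil => simp [pvModLast]
  | cons x t ih =>
    cases t with
    | nil => simp [pvModLast, pv_strip_snoc_space w x h]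
    | cons y s => simpa [pvModLast] using ih

theorem pv_mapstrip_splitC_cons_space (w : Char) (l : List Char)
    (h : PySem.Chars.isspace w = true) :
    (pvSplitC (w :: l)).map PySem.Chars.strip = (pvSplitC l).map PySem.Chars.strip := by
  have hw : w ≠ ',' := fun hh => by rw [hh] at h; simp [PySem.Chars.isspace] at h
  rw [pvSplitC_cons_ne w l hw]
  cases hS : pvSplitC l with
  | nil => exact absurd hS (pvSplitD_ne_nil _ l)
  | cons a b => simp [pvConsHead, pv_strip_cons_space w a h]

theorem pv_mapstrip_splitC_lstrip (l : List Char) :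
    (pvSplitC (PySem.Chars.lstrip l)).map PySem.Chars.strip = (pvSplitC l).map PySem.Chars.strip := by
  induction l with
  | nil => simp [PySem.Chars.lstrip]
  | cons c t ih =>
    by_cases hc : PySem.Chars.isspace c = true
    · rw [show PySem.Chars.lstrip (c :: t) = PySem.Chars.lstrip t from by
        simp [PySem.Chars.lstrip, List.dropWhile_cons, hc], ih,
        pv_mapstrip_splitC_cons_space c t hc]
    · rw [show PySem.Chars.lstrip (c :: t) = c :: t from by
        simp [PySem.Chars.lstrip, List.dropWhile_cons, hc]]

theorem pv_mapstrip_splitC_rstrip (l : List Char) :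
    (pvSplitC (PySem.Chars.rstrip l)).map PySem.Chars.strip = (pvSplitC l).map PySem.Chars.strip := by
  induction l using List.reverseRecOn with
  | nil => simp [PySem.Chars.rstrip]
  | append_singleton t w ih =>
    by_cases hw : PySem.Chars.isspace w = true
    · rw [pv_rstrip_snoc_space w t hw, ih, pvSplitC_snoc w t
        (fun hh => by rw [hh] at hw; simp [PySem.Chars.isspace] at hw),
        pv_mapstrip_modLast_space w _ hw]
    · rw [pv_rstrip_snoc_nonspace w t hw]

theorem pv_mapstrip_splitC_strip (l : List Char) :
    (pvSplitC (PySem.Chars.strip l)).map PySem.Chars.strip = (pvSplitC l).map PySem.Chars.strip := by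
  rw [PySem.Chars.strip, pv_mapstrip_splitC_rstrip, pv_mapstrip_splitC_lstrip]

def pvDelim3 (c : Char) : Bool := c == ',' || c == '\n' || c == '\r'

def pvFilterE (L : List (List Char)) : List (List Char) := L.filter (fun x => decide (x ≠ []))

theorem pvFlatMap_consHead (c : Char) (L : List (List Char)) (h : c ≠ ',') :
    (pvConsHead c L).flatMap pvSplitC = pvConsHead c (L.flatMap pvSplitC) := by
  cases L with
  | nil => simp [pvConsHead, pvSplitC, pvSplitD, h]
  | cons x t =>
    simp only [pvConsHead, List.flatMap_cons]
    rw [show pvSplitC (c :: x) = pvConsHead c (pvSplitC x) from by simp [pvSplitC, pvSplitD, h]]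
    cases hS : pvSplitC x with
    | nil => exact absurd hS (pvSplitD_ne_nil _ x)
    | cons a b => simp [pvConsHead]

theorem pvFlatMap_consHead_comma (L : List (List Char)) (h : L ≠ []) :
    (pvConsHead ',' L).flatMap pvSplitC = [] :: L.flatMap pvSplitC := by
  cases L with
  | nil => exact absurd rfl h
  | cons x t =>
    simp only [pvConsHead, List.flatMap_cons]
    rw [show pvSplitC (',' :: x) = [] :: pvSplitC x from by simp [pvSplitC, pvSplitD]]
    simp

theorem pvFilterE_cons_nil (L : List (List Char)) : pvFilterE ([] :: L) = pvFilterE L := by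
  simp [pvFilterE]

theorem pvFilterE_consHead (c : Char) (X : List (List Char)) :
    pvFilterE (pvConsHead c X) = (c :: X.headI) :: pvFilterE X.tail := by
  rw [pvConsHead_eq]
  simp [pvFilterE]

theorem pv_tails (X Y : List (List Char)) (hh : X.headI = Y.headI)
    (hf : pvFilterE X = pvFilterE Y) : pvFilterE X.tail = pvFilterE Y.tail := by
  cases X with
  | nil =>
    cases Y with
    | nil => rfl
    | cons y t =>
      have hy : y = [] := by simpa using hh.symm
      subst hy
      simpa [pvFilterE] using hf
  | cons x s =>
    cases Y with
    | nil =>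
      have hx : x = [] := by simpa using hh
      subst hx
      simpa [pvFilterE] using hf
    | cons y t =>
      have hxy : x = y := by simpa using hh
      subst hxy
      by_cases hx : x = []
      · subst hx
        simpa [pvFilterE] using hf
      · rw [show pvFilterE (x :: s) = x :: pvFilterE s from by simp [pvFilterE, hx],
            show pvFilterE (x :: t) = x :: pvFilterE t from by simp [pvFilterE, hx]] at hf
        simpa using hf

theorem pv_core (v : List Char) :
    ((pvSL v).flatMap pvSplitC).headI = (pvSplitD pvDelim3 v).headI ∧
      pvFilterE ((pvSL v).flatMap pvSplitC) = pvFilterE (pvSplitD pvDelim3 v) := by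
  induction v using pvSL.induct with
  | case1 =>
    refine ⟨rfl, ?_⟩
    simp [pvSL, pvSplitD, pvFilterE]
  | case2 c h1 =>
    have hd : pvDelim3 c = true := by rcases h1 with h | h <;> simp [pvDelim3, h]
    simp [pvSL, h1, pvSplitD, hd, pvSplitC, pvFilterE, pvConsHead]
  | case3 c h1 =>
    by_cases h2 : c = ','
    · subst h2
      simp [pvSL, pvSplitD, pvSplitC, pvDelim3, pvFilterE, pvConsHead, h1]
    · have hd : pvDelim3 c = false := by
        simp only [pvDelim3, Bool.or_eq_false_iff, beq_eq_false_iff_ne, ne_eq]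
        push_neg at h1
        exact ⟨⟨h2, h1.1⟩, h1.2⟩
      simp [pvSL, h1, pvSplitD, hd, pvSplitC, pvFilterE, pvConsHead, h2]
  | case4 c d r hpair ih =>
    obtain ⟨hc, hd⟩ := hpair
    subst hc hd
    rw [show pvSL ('\r' :: '\n' :: r) = [] :: pvSL r from by simp [pvSL]]
    rw [show pvSplitD pvDelim3 ('\r' :: '\n' :: r) = [] :: [] :: pvSplitD pvDelim3 r from by
      simp [pvSplitD, pvDelim3, pvConsHead]]
    simp only [List.flatMap_cons]
    rw [show pvSplitC [] = [[]] from rfl]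
    refine ⟨by simp, ?_⟩
    simp only [List.singleton_append]
    rw [pvFilterE_cons_nil, pvFilterE_cons_nil, pvFilterE_cons_nil]
    exact ih.2
  | case5 c d r hpair hbrk ih =>
    have hSL : pvSL (c :: d :: r) = [] :: pvSL (d :: r) := by
      rw [pvSL]
      simp [hpair, hbrk]
    have hdel : pvDelim3 c = true := by rcases hbrk with h | h <;> simp [pvDelim3, h]
    rw [hSL, show pvSplitD pvDelim3 (c :: d :: r) = [] :: pvSplitD pvDelim3 (d :: r) from by
      simp [pvSplitD, hdel]]
    simp only [List.flatMap_cons]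
    rw [show pvSplitC [] = [[]] from rfl]
    refine ⟨by simp, ?_⟩
    simp only [List.singleton_append]
    rw [pvFilterE_cons_nil, pvFilterE_cons_nil]
    exact ih.2
  | case6 c d r hpair hbrk ih =>
    have hSL : pvSL (c :: d :: r) = pvConsHead c (pvSL (d :: r)) := by
      rw [pvSL]
      simp [hpair, hbrk]
    rw [hSL]
    by_cases hc : c = ','
    · subst hc
      rw [pvFlatMap_consHead_comma _ (pvSL_ne_nil _ (by simp))]
      rw [show pvSplitD pvDelim3 (',' :: d :: r) = [] :: pvSplitD pvDelim3 (d :: r) from by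
        simp [pvSplitD, pvDelim3]]
      refine ⟨by simp, ?_⟩
      rw [pvFilterE_cons_nil, pvFilterE_cons_nil]
      exact ih.2
    · have hdel : pvDelim3 c = false := by
        push_neg at hbrk
        simp only [pvDelim3, Bool.or_eq_false_iff, beq_eq_false_iff_ne, ne_eq]
        exact ⟨⟨hc, hbrk.1⟩, hbrk.2⟩
      rw [pvFlatMap_consHead c _ hc]
      rw [show pvSplitD pvDelim3 (c :: d :: r) = pvConsHead c (pvSplitD pvDelim3 (d :: r)) from by
        simp [pvSplitD, hdel]]
      rw [pvFilterE_consHead, pvFilterE_consHead]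
      refine ⟨by rw [pvConsHead_eq, pvConsHead_eq]; simp [ih.1], ?_⟩
      rw [ih.1, pv_tails _ _ ih.1 ih.2]

def pvDelim4 (c : Char) : Bool := c == ';' || c == ',' || c == '\n' || c == '\r'

def pvMapStrip (L : List (List Char)) : List (List Char) := L.map PySem.Chars.strip

-- the token list of one raw string: the common normal form of both sides
def pvTok (s : List Char) : List (List Char) := pvFilterE (pvMapStrip (pvSplitD pvDelim4 s))

-- what A does to one (already split) line, as a function of the line
def pvLineTok (l : List Char) : List (List Char) :=
  if PySem.Chars.strip l = [] then []
  else if PySem.Chars.isIn [','] (PySem.Chars.strip l) = true then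
    pvFilterE ((pvSplitC (PySem.Chars.strip l)).map PySem.Chars.strip)
  else [PySem.Chars.strip l]

theorem pv_strip_nil : PySem.Chars.strip [] = [] := rfl

theorem pv_lineTok (l : List Char) :
    pvLineTok l = pvFilterE ((pvSplitC l).map PySem.Chars.strip) := by
  unfold pvLineTok
  by_cases h0 : PySem.Chars.strip l = []
  · rw [if_pos h0, pvSplitC_no_comma l (pv_strip_nil_no_comma l h0)]
    simp [pvFilterE, h0]
  · rw [if_neg h0]
    by_cases h1 : PySem.Chars.isIn [','] (PySem.Chars.strip l) = true
    · rw [if_pos h1, pv_mapstrip_splitC_strip]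
    · rw [if_neg h1]
      have hnc : ',' ∉ l := by
        intro hm
        exact h1 ((pv_isIn_singleton _ _).mpr ((pv_comma_mem_strip_iff l).mpr hm))
      rw [pvSplitC_no_comma l hnc]
      simp [pvFilterE, h0]

theorem pv_sub_delim (c : Char) : pvDelim3 (pvSub c) = pvDelim4 c := by
  by_cases h : c = ';'
  · subst h; rfl
  · rw [show pvSub c = c from by simp [pvSub, h]]
    rw [pvDelim3, pvDelim4, show (c == ';') = false from by simp [h]]
    simp

theorem pv_splitD3_map_sub (s : List Char) :
    pvSplitD pvDelim3 (s.map pvSub) = pvSplitD pvDelim4 s := by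
  induction s with
  | nil => rfl
  | cons c t ih =>
    simp only [List.map_cons, pvSplitD]
    rw [pv_sub_delim, ih]
    cases hd : pvDelim4 c with
    | true => simp
    | false =>
      have hc : c ≠ ';' := fun hh => by rw [hh] at hd; simp [pvDelim4] at hd
      rw [show pvSub c = c from by simp [pvSub, hc]]

theorem pvFilterE_append (X Y : List (List Char)) :
    pvFilterE (X ++ Y) = pvFilterE X ++ pvFilterE Y := by
  simp [pvFilterE]

theorem pv_mapstrip_filterE (X : List (List Char)) :
    pvFilterE (X.map PySem.Chars.strip)
      = (X.filter (fun x => decide (PySem.Chars.strip x ≠ []))).map PySem.Chars.strip := by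
  induction X with
  | nil => simp [pvFilterE]
  | cons x t ih =>
    by_cases h : PySem.Chars.strip x = [] <;>
      simp [pvFilterE, List.filter_cons, h] <;> simpa [pvFilterE] using ih

theorem pv_filter_strip_filterE (X : List (List Char)) :
    X.filter (fun x => decide (PySem.Chars.strip x ≠ []))
      = (pvFilterE X).filter (fun x => decide (PySem.Chars.strip x ≠ [])) := by
  induction X with
  | nil => simp [pvFilterE]
  | cons x t ih =>
    by_cases hx : x = []
    · subst hx
      rw [List.filter_cons_of_neg (by simp [pv_strip_nil]), pvFilterE_cons_nil]
      exact ih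
    · rw [show pvFilterE (x :: t) = x :: pvFilterE t from by simp [pvFilterE, hx]]
      by_cases hs : PySem.Chars.strip x = []
      · rw [List.filter_cons_of_neg (by simp [hs]), List.filter_cons_of_neg (by simp [hs])]
        exact ih
      · rw [List.filter_cons_of_pos (by simp [hs]), List.filter_cons_of_pos (by simp [hs]), ih]

theorem pv_filterE_mapstrip_congr (X Y : List (List Char)) (h : pvFilterE X = pvFilterE Y) :
    pvFilterE (X.map PySem.Chars.strip) = pvFilterE (Y.map PySem.Chars.strip) := by
  rw [pv_mapstrip_filterE, pv_mapstrip_filterE, pv_filter_strip_filterE X,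
    pv_filter_strip_filterE Y, h]

theorem pv_flatMap_pull (L : List (List Char)) :
    L.flatMap (fun l => pvFilterE ((pvSplitC l).map PySem.Chars.strip)) =
      pvFilterE ((L.flatMap pvSplitC).map PySem.Chars.strip) := by
  induction L with
  | nil => simp [pvFilterE]
  | cons l t ih =>
    simp only [List.flatMap_cons, List.map_append, pvFilterE_append]
    rw [ih]

theorem pv_dom_map_sub (s : List Char) (h : ∀ c ∈ s, pvDomChar c = true) :
    ∀ c ∈ s.map pvSub, pvDomChar c = true := by
  intro c hc
  obtain ⟨a, ha, rfl⟩ := List.mem_map.mp hc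
  by_cases hsemi : a = ';'
  · rw [show pvSub a = '\n' from by simp [pvSub, hsemi]]
    decide
  · rw [show pvSub a = a from by simp [pvSub, hsemi]]
    exact h a ha

theorem pv_tokA (s : List Char) (h : ∀ c ∈ s, pvDomChar c = true) :
    (PySem.Chars.splitlines (PySem.Chars.replace s [';'] ['\n'])).flatMap pvLineTok = pvTok s := by
  rw [pv_replace_semi, pv_splitlines_eq_pvSL _ (pv_dom_map_sub s h)]
  rw [show pvLineTok = fun l => pvFilterE ((pvSplitC l).map PySem.Chars.strip) from
    funext pv_lineTok]
  rw [pv_flatMap_pull, pv_filterE_mapstrip_congr _ _ (pv_core (s.map pvSub)).2,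
    pv_splitD3_map_sub]
  rfl

-- ===== String-level bridges =====

theorem pv_str_strip_empty (line : String) :
    (PySem.Str.strip line = "") ↔ PySem.Chars.strip line.toList = [] := by
  rw [← String.toList_inj, PySem.Str.toList_strip]
  simp [show ("" : String).toList = [] from by decide]

theorem pv_isIn_comma_str (line : String) :
    PySem.Str.isIn "," line = PySem.Chars.isIn [','] line.toList := by
  rw [PySem.Str.isIn_eq, show ("," : String).toList = [','] from by decide]

theorem pv_split_comma (s : String) :
    ∃ parts : List String, PySem.Str.split? s "," = some parts ∧
      parts.map String.toList = pvSplitC s.toList := by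
  have h := PySem.Str.split?_map s ","
  rw [show ("," : String).toList = [','] from by decide, PySem.Chars.split?,
    if_neg (by simp)] at h
  cases hs : PySem.Str.split? s "," with
  | none => rw [hs] at h; simp at h
  | some parts =>
    rw [hs] at h
    simp only [Option.map_some, Option.some.injEq] at h
    exact ⟨parts, rfl, by rw [h, pv_splitOn_comma]⟩

theorem pv_bridge_tokens (parts : List String) :
    ((parts.map PySem.Str.strip).filter (fun p => decide (p ≠ ""))).map String.toList =
      pvFilterE ((parts.map String.toList).map PySem.Chars.strip) := by
  induction parts with
  | nil => simp [pvFilterE]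
  | cons p t ih =>
    simp only [List.map_cons]
    by_cases h : PySem.Str.strip p = ""
    · have hc : PySem.Chars.strip p.toList = [] := (pv_str_strip_empty p).mp h
      rw [List.filter_cons_of_neg (by simp [h]),
        show pvFilterE (PySem.Chars.strip p.toList :: (t.map String.toList).map PySem.Chars.strip)
          = pvFilterE ((t.map String.toList).map PySem.Chars.strip) from by
            rw [hc, pvFilterE_cons_nil]]
      exact ih
    · have hc : ¬ PySem.Chars.strip p.toList = [] := fun hh => h ((pv_str_strip_empty p).mpr hh)
      rw [List.filter_cons_of_pos (by simp [h]),
        show pvFilterE (PySem.Chars.strip p.toList :: (t.map String.toList).map PySem.Chars.strip)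
          = PySem.Chars.strip p.toList :: pvFilterE ((t.map String.toList).map PySem.Chars.strip)
          from by simp [pvFilterE, hc],
        List.map_cons, PySem.Str.toList_strip, ih]

-- ===== fold-level lemmas, stated with the ports' exact step functions =====

set_option maxHeartbeats 1000000 in
theorem pv_stepLine (items : List String) (line : String) :
    ((fun (items : List String) (line : String) =>
      let line := PySem.Str.strip line
      if line = "" then items
      else if PySem.Str.isIn "," line then
        items ++ ((((PySem.Str.split? line ",").getD []).map PySem.Str.strip).filter
          (fun p => decide (p ≠ "")))
      else items ++ [line]) items line).map String.toList
      = items.map String.toList ++ pvLineTok line.toList := by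
  simp only []
  by_cases h0 : PySem.Str.strip line = ""
  · rw [if_pos h0, pvLineTok, if_pos ((pv_str_strip_empty line).mp h0)]
    simp
  · rw [if_neg h0]
    have hc0 : ¬ PySem.Chars.strip line.toList = [] :=
      fun hh => h0 ((pv_str_strip_empty line).mpr hh)
    by_cases h1 : PySem.Str.isIn "," (PySem.Str.strip line) = true
    · rw [if_pos h1]
      obtain ⟨parts, hp, hpt⟩ := pv_split_comma (PySem.Str.strip line)
      rw [List.map_append, hp]
      rw [show (some parts).getD [] = parts from rfl]
      rw [pv_bridge_tokens parts, hpt, PySem.Str.toList_strip]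
      rw [pvLineTok, if_neg hc0, if_pos (by
        rw [pv_isIn_comma_str, PySem.Str.toList_strip] at h1
        exact h1)]
    · rw [if_neg h1, List.map_append, pvLineTok, if_neg hc0, if_neg (by
        rw [pv_isIn_comma_str, PySem.Str.toList_strip] at h1
        exact h1)]
      simp [PySem.Str.toList_strip]

set_option maxHeartbeats 1000000 in
theorem pv_foldA (L : List String) : ∀ (items : List String),
    (L.foldl (fun (items : List String) (line : String) =>
      let line := PySem.Str.strip line
      if line = "" then items
      else if PySem.Str.isIn "," line then
        items ++ ((((PySem.Str.split? line ",").getD []).map PySem.Str.strip).filter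
          (fun p => decide (p ≠ "")))
      else items ++ [line]) items).map String.toList
      = items.map String.toList ++ L.flatMap (fun line => pvLineTok line.toList) := by
  induction L with
  | nil => intro items; simp
  | cons v t ih =>
    intro items
    rw [List.foldl_cons, ih, pv_stepLine]
    simp [List.flatMap_cons]

set_option maxHeartbeats 1000000 in
theorem pv_rawA (raw : String) (items : List String) (h : pvDomStr raw = true) :
    ((PySem.Str.splitlines (PySem.Str.replace raw ";" "\n")).foldl
      (fun (items : List String) (line : String) =>
        let line := PySem.Str.strip line
        if line = "" then items
        else if PySem.Str.isIn "," line then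
          items ++ ((((PySem.Str.split? line ",").getD []).map PySem.Str.strip).filter
            (fun p => decide (p ≠ "")))
        else items ++ [line]) items).map String.toList
      = items.map String.toList ++ pvTok raw.toList := by
  rw [pv_foldA]
  congr 1
  have hfl : ∀ (L : List String), L.flatMap (fun line => pvLineTok line.toList)
      = (L.map String.toList).flatMap pvLineTok := by
    intro L
    induction L with
    | nil => rfl
    | cons a b ihl => simp only [List.flatMap_cons, List.map_cons, ihl]
  rw [hfl]
  rw [PySem.Str.splitlines_map_toList, PySem.Str.toList_replace,
    show (";" : String).toList = [';'] from by decide,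
    show ("\n" : String).toList = ['\n'] from by decide]
  exact pv_tokA raw.toList (by
    rw [pvDomStr] at h
    simpa using fun c hc => List.all_eq_true.mp h c hc)

set_option maxHeartbeats 1000000 in
theorem pv_foldB (l : List Char) : ∀ (items : List String) (cur : List Char),
    ((fun st : List String × List Char =>
        let tok := PySem.Str.strip (String.ofList st.2)
        if tok = "" then st.1 else st.1 ++ [tok])
      (l.foldl (fun (st : List String × List Char) ch =>
        if ch = ';' ∨ ch = ',' ∨ ch = '\n' ∨ ch = '\r' then
          let tok := PySem.Str.strip (String.ofList st.2)
          ((if tok = "" then st.1 else st.1 ++ [tok]), [])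
        else (st.1, st.2 ++ [ch])) (items, cur))).map String.toList
      = items.map String.toList
        ++ pvFilterE ((pvConsPre cur (pvSplitD pvDelim4 l)).map PySem.Chars.strip) := by
  induction l with
  | nil =>
    intro items cur
    simp only [List.foldl_nil]
    rw [show pvSplitD pvDelim4 [] = [[]] from rfl]
    rw [show pvConsPre cur [[]] = [cur] from by simp [pvConsPre]]
    by_cases h : PySem.Str.strip (String.ofList cur) = ""
    · have hc : PySem.Chars.strip cur = [] := by
        have := (pv_str_strip_empty (String.ofList cur)).mp h
        simpa using this
      simp [h, hc, pvFilterE]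
    · have hc : ¬ PySem.Chars.strip cur = [] := fun hh => h
        ((pv_str_strip_empty (String.ofList cur)).mpr (by simpa using hh))
      simp [h, hc, pvFilterE, PySem.Str.toList_strip]
  | cons ch t ih =>
    intro items cur
    rw [List.foldl_cons]
    by_cases hd : ch = ';' ∨ ch = ',' ∨ ch = '\n' ∨ ch = '\r'
    · rw [if_pos hd]
      have hd4 : pvDelim4 ch = true := by
        rcases hd with h | h | h | h <;> simp [pvDelim4, h]
      rw [show pvSplitD pvDelim4 (ch :: t) = [] :: pvSplitD pvDelim4 t from by
        simp [pvSplitD, hd4]]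
      rw [show pvConsPre cur ([] :: pvSplitD pvDelim4 t) = cur :: pvSplitD pvDelim4 t from by
        simp [pvConsPre]]
      simp only []
      rw [ih]
      rw [show pvConsPre [] (pvSplitD pvDelim4 t) = pvSplitD pvDelim4 t from by
        cases hS : pvSplitD pvDelim4 t with
        | nil => exact absurd hS (pvSplitD_ne_nil _ t)
        | cons a b => simp [pvConsPre]]
      by_cases h : PySem.Str.strip (String.ofList cur) = ""
      · have hc : PySem.Chars.strip cur = [] := by
          have := (pv_str_strip_empty (String.ofList cur)).mp h
          simpa using this
        simp [h, hc, pvFilterE]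
      · have hc : ¬ PySem.Chars.strip cur = [] := fun hh => h
          ((pv_str_strip_empty (String.ofList cur)).mpr (by simpa using hh))
        simp [h, hc, pvFilterE, PySem.Str.toList_strip]
    · rw [if_neg hd]
      have hd4 : pvDelim4 ch = false := by
        push_neg at hd
        simp only [pvDelim4, Bool.or_eq_false_iff, beq_eq_false_iff_ne, ne_eq]
        exact ⟨⟨⟨hd.1, hd.2.1⟩, hd.2.2.1⟩, hd.2.2.2⟩
      rw [show pvSplitD pvDelim4 (ch :: t) = pvConsHead ch (pvSplitD pvDelim4 t) from by
        simp [pvSplitD, hd4]]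
      rw [show pvConsPre cur (pvConsHead ch (pvSplitD pvDelim4 t))
            = pvConsPre (cur ++ [ch]) (pvSplitD pvDelim4 t) from by
        rw [pvConsHead_eq]
        simp [pvConsPre]]
      exact ih items (cur ++ [ch])

theorem pv_mapToList_inj (a b : List String)
    (h : a.map String.toList = b.map String.toList) : a = b := by
  induction a generalizing b with
  | nil => cases b <;> simp_all
  | cons x s ih =>
    cases b with
    | nil => simp at h
    | cons y t =>
      simp only [List.map_cons, List.cons.injEq] at h
      exact by rw [String.toList_inj.mp h.1, ih t h.2]

set_option maxHeartbeats 1000000 in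
theorem pv_step_eq (items : List String) (raw : String) (h : pvDomStr raw = true) :
    ((PySem.Str.splitlines (PySem.Str.replace raw ";" "\n")).foldl
      (fun (items : List String) (line : String) =>
        let line := PySem.Str.strip line
        if line = "" then items
        else if PySem.Str.isIn "," line then
          items ++ ((((PySem.Str.split? line ",").getD []).map PySem.Str.strip).filter
            (fun p => decide (p ≠ "")))
        else items ++ [line]) items)
    = (let st := raw.toList.foldl (fun (st : List String × List Char) ch =>
          if ch = ';' ∨ ch = ',' ∨ ch = '\n' ∨ ch = '\r' then
            let tok := PySem.Str.strip (String.ofList st.2)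
            ((if tok = "" then st.1 else st.1 ++ [tok]), [])
          else (st.1, st.2 ++ [ch])) (items, ([] : List Char))
       let tok := PySem.Str.strip (String.ofList st.2)
       if tok = "" then st.1 else st.1 ++ [tok]) := by
  apply pv_mapToList_inj
  rw [pv_rawA raw items h]
  have hB := pv_foldB raw.toList items []
  rw [show pvConsPre [] (pvSplitD pvDelim4 raw.toList) = pvSplitD pvDelim4 raw.toList from by
    cases hS : pvSplitD pvDelim4 raw.toList with
    | nil => exact absurd hS (pvSplitD_ne_nil _ _)
    | cons x y => simp [pvConsPre]] at hB
  exact hB.symm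

def pvStepA : List String → String → List String := fun items raw =>
  (PySem.Str.splitlines (PySem.Str.replace raw ";" "\n")).foldl
    (fun (items : List String) (line : String) =>
      let line := PySem.Str.strip line
      if line = "" then items
      else if PySem.Str.isIn "," line then
        items ++ ((((PySem.Str.split? line ",").getD []).map PySem.Str.strip).filter
          (fun p => decide (p ≠ "")))
      else items ++ [line]) items

def pvStepB : List String → String → List String := fun items raw =>
  let st := raw.toList.foldl (fun (st : List String × List Char) ch =>
    if ch = ';' ∨ ch = ',' ∨ ch = '\n' ∨ ch = '\r' then
      let tok := PySem.Str.strip (String.ofList st.2)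
      ((if tok = "" then st.1 else st.1 ++ [tok]), [])
    else (st.1, st.2 ++ [ch])) (items, ([] : List Char))
  let tok := PySem.Str.strip (String.ofList st.2)
  if tok = "" then st.1 else st.1 ++ [tok]

set_option maxHeartbeats 2000000 in
theorem pv_step_eq' (items : List String) (raw : String) (h : pvDomStr raw = true) :
    pvStepA items raw = pvStepB items raw :=
  pv_step_eq items raw h

set_option maxHeartbeats 2000000 in
theorem pv_fold_eq (vs : List String) (hdom : ∀ s ∈ vs, pvDomStr s = true) :
    ∀ (items : List String), vs.foldl pvStepA items = vs.foldl pvStepB items := by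
  induction vs with
  | nil => intro items; simp only [List.foldl_nil]
  | cons v t ih =>
    intro items
    rw [List.foldl_cons, List.foldl_cons, pv_step_eq' items v (hdom v (by simp))]
    exact ih (fun s hs => hdom s (by simp [hs])) _

-- ===== VERDICT (by name: the statement is the Claim_ definition above) =====
set_option maxHeartbeats 2000000 in
theorem go_items_py_spec : Claim_equal_go_items_py := by
  intro values hdom
  unfold Spec_go_items_py
  have hdom' : ∀ s ∈ values, pvDomStr s = true := by
    intro s hs
    unfold Dom_go_items_py at hdom
    exact List.all_eq_true.mp hdom s hs
  exact congrArg PySem.List.dedup (pv_fold_eq values hdom' [])
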